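-- pv_equiv track=rewrite | github.com/Da-Dylan-Ma/ece326 | asst3/orm/table.py | combine_scan_results
-- ===== SOURCE A (Python) =====
-- def list_intersection(l1, l2):
--     return [elm for elm in l1 if elm in l2]
--
-- def list_union(l1, l2):
--     for elm in l2 :
--         if elm not in l1:
--             l1.append(elm)
--     return l1
--
-- def combine_scan_results(op_str, results):
--     # non composed type
--     if len(results) == 0:
--         return []
--     if len(results) == 1:
--         return results[0]
--     ret = results[0]
--     for r in results[1:]:
--         if op_str == "eq":
--             ret = list_intersection(ret, r)
--         else:
--             ret = list_union(ret, r)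
--     return ret
-- ===== SOURCE B (Python) =====
-- def combine_scan_results(op_str, results):
--     if len(results) == 0:
--         return []
--     if len(results) == 1:
--         return results[0]
--     if op_str == "eq":
--         rest = results[1:]
--         return [elm for elm in results[0] if all(elm in r for r in rest)]
--     # union: same in-place mutation of results[0] as A, but one flat pass
--     acc = results[0]
--     for elm in [e for r in results[1:] for e in r]:
--         if elm not in acc:
--             acc.append(elm)
--     return acc
-- ===== Notes on version B (the rewrite author's own statement) =====
-- stated objective: alternative
-- what changed: The 'eq' branch replaces the iterated pairwise-intersection fold with a single filter over results[0] that checks membership in every remaining list at once; the union branch flattens the remaining lists and runs one flat append-if-unseen loop (still mutating results[0] in place like A).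
import Mathlib
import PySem

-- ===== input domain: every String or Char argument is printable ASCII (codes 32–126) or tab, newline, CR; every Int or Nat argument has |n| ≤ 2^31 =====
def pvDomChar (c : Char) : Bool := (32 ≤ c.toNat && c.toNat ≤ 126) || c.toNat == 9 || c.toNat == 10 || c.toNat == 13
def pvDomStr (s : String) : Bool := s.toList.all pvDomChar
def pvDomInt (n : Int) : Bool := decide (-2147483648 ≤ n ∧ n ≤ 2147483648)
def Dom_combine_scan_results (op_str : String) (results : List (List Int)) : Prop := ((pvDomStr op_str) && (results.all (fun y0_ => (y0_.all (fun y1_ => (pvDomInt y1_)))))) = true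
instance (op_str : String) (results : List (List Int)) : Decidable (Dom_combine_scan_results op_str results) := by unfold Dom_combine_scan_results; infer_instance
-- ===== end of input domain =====

-- B restructures both branches (single filter pass for 'eq'; one flat append-if-unseen loop
-- for union). Equivalence is about the RETURN value; B performs the same in-place mutation of
-- results[0] in the union case as A does.

-- ===== PORT A =====
def pvListIntersection (l1 l2 : List Int) : List Int :=
  l1.filter (fun elm => decide (elm ∈ l2))

def pvListUnion (l1 l2 : List Int) : List Int :=
  l2.foldl (fun acc elm => if elm ∈ acc then acc else acc ++ [elm]) l1

def combine_scan_results (op_str : String) (results : List (List Int)) : List Int :=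
  match results with
  | [] => []
  | [r0] => r0
  | r0 :: rest =>
      rest.foldl (fun ret r =>
        if op_str = "eq" then pvListIntersection ret r else pvListUnion ret r) r0

-- ===== PORT B =====
def combine_scan_results_alt (op_str : String) (results : List (List Int)) : List Int :=
  match results with
  | [] => []
  | r0 :: rest =>
      if rest = [] then r0
      else if op_str = "eq" then
        r0.filter (fun elm => rest.all (fun r => decide (elm ∈ r)))
      else
        (rest.flatMap id).foldl (fun acc elm => if elm ∈ acc then acc else acc ++ [elm]) r0

-- ===== PRECONDITION & SPEC =====
def Spec_combine_scan_results (op_str : String) (results : List (List Int)) (out : List Int) : Prop := out = combine_scan_results_alt op_str results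
instance (op_str : String) (results : List (List Int)) (out : List Int) : Decidable (Spec_combine_scan_results op_str results out) := by unfold Spec_combine_scan_results; infer_instance

-- ===== CLAIM (what is proved, stated in full; the proofs are below) =====
def Claim_equal_combine_scan_results : Prop := ∀ (op_str : String) (results : List (List Int)), Dom_combine_scan_results op_str results → Spec_combine_scan_results op_str results (combine_scan_results op_str results)

-- ===== LEMMAS AND PROOFS =====

-- iterated pairwise intersection = one filter checking membership in every list
lemma foldl_inter_eq_filter_all (rest : List (List Int)) (r0 : List Int) :
    rest.foldl (fun ret r => pvListIntersection ret r) r0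
      = r0.filter (fun elm => rest.all (fun r => decide (elm ∈ r))) := by
  induction rest generalizing r0 with
  | nil => simp
  | cons r rest ih =>
      rw [List.foldl_cons, ih, pvListIntersection, List.filter_filter]
      apply List.filter_congr
      intro a _
      simp [Bool.and_comm]

-- folding list_union over the lists = one append-if-unseen pass over their concatenation
lemma foldl_union_eq_flat (rest : List (List Int)) (r0 : List Int) :
    rest.foldl (fun ret r => pvListUnion ret r) r0
      = (rest.flatMap id).foldl (fun acc elm => if elm ∈ acc then acc else acc ++ [elm]) r0 := by
  induction rest generalizing r0 with
  | nil => simp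
  | cons r rest ih =>
      rw [List.foldl_cons, pvListUnion, ih, List.flatMap_cons, List.foldl_append]
      rfl

-- ===== VERDICT (by name: the statement is the Claim_ definition above) =====
theorem combine_scan_results_spec : Claim_equal_combine_scan_results := by
  intro op_str results _
  unfold Spec_combine_scan_results combine_scan_results combine_scan_results_alt
  match results with
  | [] => rfl
  | [r0] => rfl
  | r0 :: r1 :: rest =>
      by_cases h : op_str = "eq"
      · simp only [h, if_pos, reduceCtorEq]
        exact foldl_inter_eq_filter_all (r1 :: rest) r0
      · simp only [if_neg h, reduceCtorEq, if_false]
        exact foldl_union_eq_flat (r1 :: rest) r0
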